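-- pv_equiv track=rewrite | github.com/aleien95/Seq2Seq-no-attention | seq2seq-by-myself.py | bulid_dic
-- ===== SOURCE A (Python) =====
-- def bulid_dic(text_data):
--     word2id = {}
--     index = 4
--     # 基本字典
--     basic_dict = {'<pad>': 0, '<unk>': 1, '<bos>': 2, '<eos>': 3}
--     for sen in text_data:
--         for s in range(len(sen)):
--             if word2id.get(sen[s]) == None:
--                 word2id[sen[s]] = index
--                 index += 1
--     word2id.update(basic_dict)
--     id2word = {v:k for k, v in word2id.items()}
--     return word2id, id2word
-- ===== SOURCE B (Python) =====
-- def bulid_dic(text_data):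
--     # Different algorithm: record each word's FIRST-occurrence index by one
--     # reverse overwrite pass, then sort the words by that index and zip with ids.
--     words = [w for sen in text_data for w in sen]
--     first = {}
--     for i in range(len(words) - 1, -1, -1):
--         first[words[i]] = i
--     order = sorted(first, key=first.get)
--     word2id = dict(zip(order, range(4, 4 + len(order))))
--     word2id.update({'<pad>': 0, '<unk>': 1, '<bos>': 2, '<eos>': 3})
--     id2word = {v: k for k, v in word2id.items()}
--     return word2id, id2word
-- ===== Notes on version B (the rewrite author's own statement) =====
-- stated objective: alternative
-- what changed: Instead of A's single forward pass threading a mutable dict and a running counter, B records each word's first-occurrence index with a reverse overwrite pass over the flattened indices, sorts the distinct words by that index, and builds word2id by zipping the sorted words with range(4, 4+n).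
import Mathlib
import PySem

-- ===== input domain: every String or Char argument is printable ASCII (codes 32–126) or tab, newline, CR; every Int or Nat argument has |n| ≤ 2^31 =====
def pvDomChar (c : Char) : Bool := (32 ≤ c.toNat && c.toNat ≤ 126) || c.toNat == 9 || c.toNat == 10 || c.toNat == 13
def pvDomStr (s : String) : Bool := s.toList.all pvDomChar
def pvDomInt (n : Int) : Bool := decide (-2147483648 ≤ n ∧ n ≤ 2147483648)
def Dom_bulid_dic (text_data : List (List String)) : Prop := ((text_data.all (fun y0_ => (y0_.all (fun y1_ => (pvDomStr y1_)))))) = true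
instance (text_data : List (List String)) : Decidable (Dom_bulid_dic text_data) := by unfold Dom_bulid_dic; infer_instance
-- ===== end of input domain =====

-- B replaces A's single forward pass (mutable dict + running counter) by a reverse overwrite pass recording
-- first-occurrence indices, a sort of the distinct words by that index, and a zip with range(4, 4+n); objective:
-- alternative algorithm, same result.

-- ===== PORT A =====
def bulid_dic (text_data : List (List String)) : (List (String × Int)) × (List (Int × String)) :=
  let basic_dict : PySem.Dict String Int :=
    PySem.Dict.ofList [("<pad>", 0), ("<unk>", 1), ("<bos>", 2), ("<eos>", 3)]
  let st : PySem.Dict String Int × Int :=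
    text_data.foldl (fun st sen =>
      (PySem.List.pyRange 0 (PySem.List.len sen) 1).foldl (fun st s =>
        if st.1.get? (PySem.List.pyGetD sen s "") = none then
          (st.1.insert (PySem.List.pyGetD sen s "") st.2, st.2 + 1)
        else st) st) (PySem.Dict.empty, 4)
  let word2id := st.1.update basic_dict.items
  let id2word := PySem.Dict.ofList (word2id.items.map (fun kv => (kv.2, kv.1)))
  (word2id.items, id2word.items)

-- ===== PORT B =====
def bulid_dic_alt (text_data : List (List String)) : (List (String × Int)) × (List (Int × String)) :=
  let words : List String := text_data.flatMap (fun sen => sen)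
  let first : PySem.Dict String Int :=
    (PySem.List.pyRange (PySem.List.len words - 1) (-1) (-1)).foldl
      (fun d i => d.insert (PySem.List.pyGetD words i "") i) PySem.Dict.empty
  -- key=first.get: every key passed to the key function is in `first`, so getD _ 0 is exact here
  let order : List String := PySem.List.sorted first.keys (fun w => first.getD w 0) false
  let word2id : PySem.Dict String Int :=
    PySem.Dict.ofList (order.zip (PySem.List.pyRange 4 (4 + PySem.List.len order) 1))
  let word2id := word2id.update
    (PySem.Dict.ofList [("<pad>", 0), ("<unk>", 1), ("<bos>", 2), ("<eos>", 3)]).items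
  let id2word := PySem.Dict.ofList (word2id.items.map (fun kv => (kv.2, kv.1)))
  (word2id.items, id2word.items)

-- ===== PRECONDITION & SPEC =====
def Spec_bulid_dic (text_data : List (List String)) (out : (List (String × Int)) × (List (Int × String))) : Prop := out = bulid_dic_alt text_data
instance (text_data : List (List String)) (out : (List (String × Int)) × (List (Int × String))) : Decidable (Spec_bulid_dic text_data out) := by unfold Spec_bulid_dic; infer_instance

-- ===== CLAIM (what is proved, stated in full; the proofs are below) =====
def Claim_equal_bulid_dic : Prop := ∀ (text_data : List (List String)), Dom_bulid_dic text_data → Spec_bulid_dic text_data (bulid_dic text_data)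

-- ===== LEMMAS AND PROOFS =====

/-- the pairs both sides end up zipping together: word ↦ its index + 4 -/
def pvPairs (u : List String) : List (String × Int) :=
  (PySem.List.enumerate u 0).map (fun p => (p.2, p.1 + 4))

/-- A's loop body, on one word -/
def pvStep (st : PySem.Dict String Int × Int) (w : String) : PySem.Dict String Int × Int :=
  if st.1.get? w = none then (st.1.insert w st.2, st.2 + 1) else st

lemma pvPairs_fst (u : List String) : (pvPairs u).map Prod.fst = u := by
  simp [pvPairs, List.map_map, Function.comp_def, PySem.List.map_snd_enumerate]

lemma pvPairs_append_singleton (u : List String) (w : String) :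
    pvPairs (u ++ [w]) = pvPairs u ++ [(w, (u.length : Int) + 4)] := by
  simp [pvPairs, PySem.List.enumerate_append, PySem.List.enumerate_cons]

lemma pvGet_mk_pairs_none_iff (u : List String) (w : String) :
    ((PySem.Dict.mk (pvPairs u)).get? w = none) ↔ w ∉ u := by
  rw [PySem.Dict.get?_eq_none_iff_not_mem_keys]
  rw [show (PySem.Dict.mk (pvPairs u)).keys = u from by
    rw [PySem.Dict.keys_mk]; exact pvPairs_fst u]

lemma pvInvariant (ws : List String) (u : List String) (hu : u.Nodup) :
    ws.foldl pvStep (PySem.Dict.mk (pvPairs u), 4 + (u.length : Int)) =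
      (PySem.Dict.mk (pvPairs (PySem.Set.update u ws)),
        4 + ((PySem.Set.update u ws).length : Int)) := by
  induction ws generalizing u with
  | nil => simp [PySem.Set.update]
  | cons w ws ih =>
    rw [List.foldl_cons, PySem.Set.update_cons]
    by_cases hw : w ∈ u
    · rw [PySem.Set.add_of_mem hw]
      have hnone : ¬ ((PySem.Dict.mk (pvPairs u)).get? w = none) := by
        rw [pvGet_mk_pairs_none_iff]; exact not_not_intro hw
      simp only [pvStep, if_neg hnone]
      exact ih u hu
    · rw [PySem.Set.add_of_not_mem hw]
      have hnone : ((PySem.Dict.mk (pvPairs u)).get? w = none) := by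
        rw [pvGet_mk_pairs_none_iff]; exact hw
      have hnc : (PySem.Dict.mk (pvPairs u)).contains w = false := by
        rw [PySem.Dict.contains_eq_decide_mem_keys, PySem.Dict.keys_mk]
        rw [show List.map (fun x => x.1) (pvPairs u) = u from pvPairs_fst u]
        simpa using hw
      simp only [pvStep, if_pos hnone]
      have hins : (PySem.Dict.mk (pvPairs u)).insert w (4 + (u.length : Int)) =
          PySem.Dict.mk (pvPairs (u ++ [w])) := by
        apply PySem.Dict.ext
        rw [PySem.Dict.items_insert_of_not_contains _ _ hnc, pvPairs_append_singleton]
        simp; ring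
      rw [hins]
      have := ih (u ++ [w]) (by simp [List.nodup_append, hu]; exact fun a ha h => hw (h ▸ ha))
      simpa [List.length_append, add_assoc, add_comm, add_left_comm] using this

/-- Dict.ofList over pairs with distinct keys is just Dict.mk -/
lemma pvOfList_eq_mk (L : List (String × Int)) (h : (L.map Prod.fst).Nodup) :
    PySem.Dict.ofList L = PySem.Dict.mk L := by
  have : ∀ (M : List (String × Int)) (d : List (String × Int)),
      ((d ++ M).map Prod.fst).Nodup →
      M.foldl (fun d p => d.insert p.1 p.2) (PySem.Dict.mk d) = PySem.Dict.mk (d ++ M) := by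
    intro M
    induction M with
    | nil => intro d _; simp
    | cons p M ih =>
      intro d hnd
      have hnc : (PySem.Dict.mk d).contains p.1 = false := by
        rw [PySem.Dict.contains_eq_decide_mem_keys, PySem.Dict.keys_mk]
        simp only [List.map_append, List.map_cons] at hnd
        have hdisj := (List.nodup_append.mp hnd).2.2
        simp only [decide_eq_false_iff_not]
        intro hmem
        exact hdisj _ hmem p.1 (by simp) rfl
      rw [List.foldl_cons]
      have hins : (PySem.Dict.mk d).insert p.1 p.2 = PySem.Dict.mk (d ++ [p]) := by
        apply PySem.Dict.ext
        rw [PySem.Dict.items_insert_of_not_contains _ _ hnc]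
      rw [hins, ih (d ++ [p]) (by simpa using hnd)]
      simp
  have h0 := this L [] (by simpa using h)
  calc PySem.Dict.ofList L = L.foldl (fun d p => d.insert p.1 p.2) (PySem.Dict.mk []) := rfl
    _ = PySem.Dict.mk ([] ++ L) := h0
    _ = PySem.Dict.mk L := by simp

/-- A's double loop produces the dict of pvPairs over the deduped flattened words. -/
lemma pvCore (text_data : List (List String)) :
    (text_data.foldl (fun st sen =>
        (PySem.List.pyRange 0 (PySem.List.len sen) 1).foldl (fun st s =>
          if st.1.get? (PySem.List.pyGetD sen s "") = none then
            (st.1.insert (PySem.List.pyGetD sen s "") st.2, st.2 + 1)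
          else st) st) (PySem.Dict.empty, 4)).1 =
      PySem.Dict.ofList (pvPairs (PySem.List.dedup (text_data.flatMap (fun sen => sen)))) := by
  have h1 : ∀ (sen : List String) (st : PySem.Dict String Int × Int),
      (PySem.List.pyRange 0 (PySem.List.len sen) 1).foldl (fun st s =>
          if st.1.get? (PySem.List.pyGetD sen s "") = none then
            (st.1.insert (PySem.List.pyGetD sen s "") st.2, st.2 + 1)
          else st) st = sen.foldl pvStep st := by
    intro sen st
    exact PySem.List.foldl_pyRange_zero_pyGetD sen "" pvStep st
  have h2 : text_data.foldl (fun st sen =>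
        (PySem.List.pyRange 0 (PySem.List.len sen) 1).foldl (fun st s =>
          if st.1.get? (PySem.List.pyGetD sen s "") = none then
            (st.1.insert (PySem.List.pyGetD sen s "") st.2, st.2 + 1)
          else st) st) (PySem.Dict.empty, 4)
      = (text_data.flatMap (fun sen => sen)).foldl pvStep (PySem.Dict.empty, 4) := by
    rw [List.foldl_flatMap]
    exact PySem.List.foldl_congr_mem _ _ _ _ (fun st sen _ => h1 sen st)
  rw [h2]
  have hemp : (PySem.Dict.empty : PySem.Dict String Int) = PySem.Dict.mk (pvPairs []) := rfl
  rw [hemp]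
  rw [show ((PySem.Dict.mk (pvPairs []), (4:Int)) : PySem.Dict String Int × Int)
        = (PySem.Dict.mk (pvPairs []), 4 + (([] : List String).length : Int)) by norm_num]
  rw [pvInvariant _ [] List.nodup_nil]
  rw [PySem.Set.update_nil_left]
  rw [pvOfList_eq_mk _ (by rw [pvPairs_fst]; exact PySem.Set.nodup_ofList _)]
  simp

-- ===== B-side lemmas =====

/-- structural first-occurrence dedup -/
def pvFo : List String → List String
  | [] => []
  | x :: t => x :: (pvFo t).filter (fun a => decide (a ≠ x))

lemma pvUpdate_eq_append_filter (ws : List String) :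
    ∀ acc : List String,
      PySem.Set.update acc ws = acc ++ (pvFo ws).filter (fun a => decide (a ∉ acc)) := by
  induction ws with
  | nil => intro acc; simp [PySem.Set.update, pvFo]
  | cons w ws ih =>
    intro acc
    rw [PySem.Set.update_cons]
    by_cases hw : w ∈ acc
    · rw [PySem.Set.add_of_mem hw, ih acc, pvFo]
      simp only [List.filter_cons, decide_eq_true_eq]
      rw [if_neg (by simp [hw])]
      rw [List.filter_filter]
      congr 1
      apply List.filter_congr
      intro a _
      by_cases ha : a ∈ acc
      · simp [ha]
      · have haw : ¬ a = w := fun h => ha (h ▸ hw)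
        simp [ha, haw]
    · rw [PySem.Set.add_of_not_mem hw, ih (acc ++ [w]), pvFo]
      simp only [List.filter_cons, decide_eq_true_eq]
      rw [if_pos (by simp [hw])]
      rw [List.filter_filter]
      simp only [List.append_assoc, List.cons_append, List.nil_append]
      congr 2
      apply List.filter_congr
      intro a _
      by_cases ha : a ∈ acc <;> by_cases haw : a = w <;> simp [ha, haw]

lemma pvDedup_eq_fo (ws : List String) : PySem.List.dedup ws = pvFo ws := by
  have h := pvUpdate_eq_append_filter ws []
  rw [PySem.Set.update_nil_left] at h
  simpa using h

lemma pvFo_pairwise (ws : List String) :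
    (pvFo ws).Pairwise (fun a b => ws.idxOf a < ws.idxOf b) := by
  induction ws with
  | nil => simp [pvFo]
  | cons x t ih =>
    rw [pvFo]
    constructor
    · intro b hb
      have hbx : b ≠ x := by
        have := List.of_mem_filter hb
        simpa using this
      simp [hbx.symm]
    · have hf := ih.filter (fun a => decide (a ≠ x))
      apply hf.imp_of_mem
      intro a b ha hb hab
      have hax : a ≠ x := by simpa using List.of_mem_filter ha
      have hbx : b ≠ x := by simpa using List.of_mem_filter hb
      simp [hax.symm, hbx.symm]
      omega

lemma pvDedup_pairwise (ws : List String) :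
    (PySem.List.dedup ws).Pairwise (fun a b => ws.idxOf a < ws.idxOf b) := by
  rw [pvDedup_eq_fo]; exact pvFo_pairwise ws

/-- looking up after the reverse-index insert loop = first match along the index list -/
lemma pvGet_revfold (ws : List String) (l : List Int) (d : PySem.Dict String Int) (w : String) :
    (l.reverse.foldl (fun d i => d.insert (PySem.List.pyGetD ws i "") i) d).get? w =
      (match l.find? (fun i => PySem.List.pyGetD ws i "" == w) with
        | some i => some i
        | none => d.get? w) := by
  induction l generalizing d with
  | nil => simp
  | cons i l ih =>
    rw [List.reverse_cons, List.foldl_append]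
    simp only [List.foldl_cons, List.foldl_nil]
    rw [PySem.Dict.get?_insert]
    rw [List.find?_cons]
    by_cases h : PySem.List.pyGetD ws i "" = w
    · simp [h]
    · have : (PySem.List.pyGetD ws i "" == w) = false := by simpa using h
      simp only [this]
      rw [if_neg (fun hw => h hw.symm)]
      exact ih d

lemma pvFind_range (ws : List String) (w : String) (hw : w ∈ ws) :
    (List.range ws.length).find? (fun k => ws.getD k "" == w) = some (ws.idxOf w) := by
  induction ws with
  | nil => cases hw
  | cons x t ih =>
    rw [List.length_cons, List.range_succ_eq_map, List.find?_cons]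
    by_cases hx : x = w
    · simp [hx]
    · have hp : ((x :: t).getD 0 "" == w) = false := by simpa using hx
      simp only [hp]
      rw [List.find?_map]
      have hco : ((fun k => (x :: t).getD k "" == w) ∘ Nat.succ) = (fun k => t.getD k "" == w) := by
        funext k; simp [Function.comp]
      rw [hco, ih (by cases hw with | head => exact absurd rfl hx | tail _ h => exact h)]
      simp [hx]

/-- the reverse pass maps every word present to its first-occurrence index -/
lemma pvFirst_get (ws : List String) (w : String) (hw : w ∈ ws) :
    (((PySem.List.pyRange 0 (ws.length : Int) 1).reverse).foldl
        (fun d i => d.insert (PySem.List.pyGetD ws i "") i) PySem.Dict.empty).get? w =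
      some (ws.idxOf w : Int) := by
  rw [pvGet_revfold]
  rw [PySem.List.pyRange_zero_natCast, List.find?_map]
  have hco : ((fun i => PySem.List.pyGetD ws i "" == w) ∘ (fun k : Nat => (k : Int))) =
      (fun k => ws.getD k "" == w) := by
    funext k; simp [Function.comp]
  rw [hco, pvFind_range ws w hw]
  simp

lemma pvFirst_keys (ws : List String) :
    (((PySem.List.pyRange 0 (ws.length : Int) 1).reverse).foldl
        (fun d i => d.insert (PySem.List.pyGetD ws i "") i) PySem.Dict.empty).keys =
      PySem.Set.ofList ws.reverse := by
  rw [PySem.Dict.keys_foldl_insert_key _ (fun i => PySem.List.pyGetD ws i "") (fun _ i => i)]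
  rw [PySem.Dict.keys_empty, PySem.Set.update_nil_left]
  congr 1
  rw [List.map_reverse]
  congr 1
  simpa using PySem.List.map_pyGetD_pyRange_zero ws ""

/-- B's sorted list of distinct words is the first-appearance dedup -/
lemma pvOrder_eq_dedup (ws : List String) :
    (PySem.List.sorted
      (((PySem.List.pyRange 0 (ws.length : Int) 1).reverse).foldl
          (fun d i => d.insert (PySem.List.pyGetD ws i "") i) PySem.Dict.empty).keys
      (fun w => (((PySem.List.pyRange 0 (ws.length : Int) 1).reverse).foldl
          (fun d i => d.insert (PySem.List.pyGetD ws i "") i) PySem.Dict.empty).getD w 0)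
      false) = PySem.List.dedup ws := by
  apply PySem.List.sorted_eq_of_perm_of_pairwise_lt
  · rw [pvFirst_keys]
    rw [List.perm_ext_iff_of_nodup (PySem.List.nodup_dedup ws) (PySem.Set.nodup_ofList _)]
    intro a
    rw [PySem.List.mem_dedup, PySem.Set.mem_ofList, List.mem_reverse]
  · apply (pvDedup_pairwise ws).imp_of_mem
    intro a b ha hb hab
    have ha' : a ∈ ws := (PySem.List.mem_dedup _ _).mp ha
    have hb' : b ∈ ws := (PySem.List.mem_dedup _ _).mp hb
    rw [PySem.Dict.getD_eq_get?_getD, PySem.Dict.getD_eq_get?_getD,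
      pvFirst_get ws a ha', pvFirst_get ws b hb']
    simpa using hab

lemma pvZip_enum (u : List String) :
    ∀ s t : Int, u.zip ((List.range u.length).map (fun k : Nat => (k : Int) + s + t)) =
      (PySem.List.enumerate u s).map (fun p => (p.2, p.1 + t)) := by
  induction u with
  | nil => intro s t; simp
  | cons x u ih =>
    intro s t
    rw [List.length_cons, List.range_succ_eq_map, PySem.List.enumerate_cons]
    simp only [List.map_cons, List.zip_cons_cons, List.map_map]
    congr 1
    · simp
    · rw [show ((fun k : Nat => (k : Int) + s + t) ∘ Nat.succ) = (fun k : Nat => (k : Int) + (s + 1) + t) from by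
        funext k; simp [Function.comp]; ring]
      exact ih (s + 1) t

/-- B's zip with range(4, 4+n) is pvPairs -/
lemma pvZip_eq_pairs (u : List String) :
    u.zip (PySem.List.pyRange 4 (4 + PySem.List.len u) 1) = pvPairs u := by
  rw [PySem.List.len_eq, PySem.List.pyRange_one]
  rw [show ((4 : Int) + (u.length : Int) - 4).toNat = u.length from by omega]
  rw [show (fun k : Nat => (4 : Int) + (k : Int)) = (fun k : Nat => (k : Int) + 0 + 4) from by
    funext k; ring]
  rw [pvZip_enum u 0 4]
  rfl

-- ===== VERDICT (by name: the statement is the Claim_ definition above) =====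
theorem bulid_dic_spec : Claim_equal_bulid_dic := by
  intro text_data _
  unfold Spec_bulid_dic bulid_dic bulid_dic_alt
  simp only
  rw [pvCore text_data]
  have hrev : PySem.List.pyRange (PySem.List.len (text_data.flatMap (fun sen => sen)) - 1) (-1) (-1)
      = (PySem.List.pyRange 0 ((text_data.flatMap (fun sen => sen)).length : Int) 1).reverse := by
    rw [PySem.List.pyRange_neg_one_eq_reverse]
    norm_num [PySem.List.len_eq]
  rw [hrev, pvOrder_eq_dedup]
  rw [pvZip_eq_pairs]
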